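-- pv_equiv track=rewrite | github.com/SassAndSweet/asifah-europe-backend | rhetoric_tracker_russia.py | _score_vector
-- ===== SOURCE A (Python) =====
-- def _score_vector(articles, trigger_dict):
--     """Score all articles against a vector trigger ladder. Returns (max_level, trigger_phrase)."""
--     max_level = 0
--     trigger   = None
--     for art in articles:
--         title = (art.get('title') or '').lower()
--         desc  = (art.get('description') or '').lower()
--         text  = f"{title} {desc}"
--         for level in sorted(trigger_dict.keys(), reverse=True):
--             for phrase in trigger_dict[level]:
--                 if phrase.lower() in text:
--                     if level > max_level:
--                         max_level = level
--                         trigger   = phrase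
--                     break
--     return max_level, trigger
-- ===== SOURCE B (Python) =====
-- def _score_vector(articles, trigger_dict):
--     """Score all articles against a vector trigger ladder. Returns (max_level, trigger_phrase)."""
--     texts = [
--         f"{(art.get('title') or '').lower()} {(art.get('description') or '').lower()}"
--         for art in articles
--     ]
--     for level in sorted(trigger_dict, reverse=True):
--         for text in texts:
--             for phrase in trigger_dict[level]:
--                 if phrase.lower() in text:
--                     return level, phrase
--     return 0, None
-- ===== Notes on version B (the rewrite author's own statement) =====
-- stated objective: alternative
-- what changed: B precomputes each article's lowercased text once, then searches trigger levels in descending order as the outer loop and returns immediately on the first matching phrase, eliminating A's running-max accumulator and per-article rescans of the whole ladder.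
-- intended difference: On inputs where no phrase at a positive level matches any article but some phrase at a non-positive level does, A returns (0, None) because its running max starts at 0 and strict '>' makes non-positive levels unreachable, while B returns the highest matching level and its phrase; reporting the trigger the caller actually put in the ladder is the intended behaviour. — e.g. on _score_vector([[("title", "x")]], [(-1, ["x"])]): A returns (0, none), B returns (-1, some "x")
import Mathlib
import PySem

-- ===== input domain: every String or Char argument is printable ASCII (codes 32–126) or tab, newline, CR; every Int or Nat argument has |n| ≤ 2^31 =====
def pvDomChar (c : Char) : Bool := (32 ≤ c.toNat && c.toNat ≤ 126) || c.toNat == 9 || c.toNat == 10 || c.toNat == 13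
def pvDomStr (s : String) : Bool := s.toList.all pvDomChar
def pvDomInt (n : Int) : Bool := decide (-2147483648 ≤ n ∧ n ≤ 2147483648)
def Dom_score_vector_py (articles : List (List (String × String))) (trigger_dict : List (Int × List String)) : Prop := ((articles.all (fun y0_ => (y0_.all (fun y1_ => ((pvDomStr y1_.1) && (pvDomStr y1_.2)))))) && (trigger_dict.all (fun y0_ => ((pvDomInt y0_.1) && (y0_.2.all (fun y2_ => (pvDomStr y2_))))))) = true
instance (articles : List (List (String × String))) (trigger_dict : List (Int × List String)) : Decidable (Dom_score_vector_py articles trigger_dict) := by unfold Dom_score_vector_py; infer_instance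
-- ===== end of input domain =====

-- B precomputes the article texts once and searches trigger levels in descending order with an
-- early return on the first hit, instead of A's running-max accumulator (objective: alternative).

-- Shared article-text helper: `(art.get('title') or '').lower() + " " + (art.get('description') or '').lower()`,
-- as a List Char; `x or ''` on a string value equals `x` when present and `''` when the key is absent, i.e. getD "".
def pvText (art : List (String × String)) : List Char :=
  PySem.Chars.lower (((PySem.Dict.ofList art).getD "title" "").toList)
    ++ ' ' :: PySem.Chars.lower (((PySem.Dict.ofList art).getD "description" "").toList)

-- ===== PORT A =====
-- inner `for phrase in trigger_dict[level]: if phrase.lower() in text: …; break`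
def pvA_phrases (text : List Char) (level : Int) (phrases : List String)
    (st : Int × Option String) : Int × Option String :=
  match phrases with
  | [] => st
  | p :: ps =>
    if PySem.Chars.isIn (PySem.Chars.lower p.toList) text then
      (if level > st.1 then (level, some p) else st)  -- then break
    else pvA_phrases text level ps st

def score_vector_py (articles : List (List (String × String))) (trigger_dict : List (Int × List String)) : Int × Option String :=
  let d := PySem.Dict.ofList trigger_dict
  let levels := PySem.List.sorted d.keys (fun x => x) true
  articles.foldl
    (fun st art =>
      levels.foldl (fun st level => pvA_phrases (pvText art) level (d.getD level []) st) st)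
    (0, none)  -- max_level = 0, trigger = None; trigger_dict[level] ported as getD (level is always a key)

-- ===== PORT B =====
-- first phrase of the list whose lowercase is a substring of text
def pvB_firstPhrase (phrases : List String) (text : List Char) : Option String :=
  match phrases with
  | [] => none
  | p :: ps =>
    if PySem.Chars.isIn (PySem.Chars.lower p.toList) text then some p
    else pvB_firstPhrase ps text

-- `for text in texts: for phrase in …: … return`
def pvB_scan (texts : List (List Char)) (phrases : List String) : Option String :=
  match texts with
  | [] => none
  | t :: ts =>
    match pvB_firstPhrase phrases t with
    | some p => some p
    | none => pvB_scan ts phrases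

-- outer loop over the descending levels: return the first (level, phrase) hit
def pvB_levels (d : PySem.Dict Int (List String)) (texts : List (List Char)) :
    List Int → Int × Option String
  | [] => (0, none)
  | L :: ls =>
    match pvB_scan texts (d.getD L []) with
    | some p => (L, some p)  -- return level, phrase
    | none => pvB_levels d texts ls

def score_vector_py_alt (articles : List (List (String × String))) (trigger_dict : List (Int × List String)) : Int × Option String :=
  let texts := articles.map pvText
  let d := PySem.Dict.ofList trigger_dict
  pvB_levels d texts (PySem.List.sorted d.keys (fun x => x) true)

-- ===== PRECONDITION & SPEC =====
-- does any article's text contain any of these phrases (lowercased)?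
def pvHitB (articles : List (List (String × String))) (phrases : List String) : Bool :=
  articles.any (fun art => phrases.any (fun p => PySem.Chars.isIn (PySem.Chars.lower p.toList) (pvText art)))

-- On inputs where no phrase at a positive level matches any article but some phrase at a
-- non-positive level does, A returns (0, None) (its running max starts at 0 and strict '>'
-- makes non-positive levels unreachable), while B returns the highest matching level and its
-- phrase; reporting the trigger the caller actually put in the ladder is the intended behaviour.
def D_score_vector_py (articles : List (List (String × String))) (trigger_dict : List (Int × List String)) : Prop :=
  let hits := (PySem.Dict.ofList trigger_dict).keys.filter
    (fun L => pvHitB articles ((PySem.Dict.ofList trigger_dict).getD L []))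
  hits ≠ [] ∧ hits.all (fun L => decide (L ≤ 0)) = true
instance (articles : List (List (String × String))) (trigger_dict : List (Int × List String)) : Decidable (D_score_vector_py articles trigger_dict) := by unfold D_score_vector_py; infer_instance

def Spec_score_vector_py (articles : List (List (String × String))) (trigger_dict : List (Int × List String)) (out : Int × Option String) : Prop := ¬ D_score_vector_py articles trigger_dict → out = score_vector_py_alt articles trigger_dict
instance (articles : List (List (String × String))) (trigger_dict : List (Int × List String)) (out : Int × Option String) : Decidable (Spec_score_vector_py articles trigger_dict out) := by unfold Spec_score_vector_py; infer_instance

def pvDiffWitness_score_vector_py : (List (List (String × String))) × (List (Int × List String)) :=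
  ([[("title", "x")]], [(-1, ["x"])])
def pvDiffWitnessOut_score_vector_py : (Int × Option String) × (Int × Option String) :=
  ((0, none), (-1, some "x"))

-- ===== CLAIM (what is proved, stated in full; the proofs are below) =====
def Claim_unchanged_score_vector_py : Prop := ∀ (articles : List (List (String × String))) (trigger_dict : List (Int × List String)), Dom_score_vector_py articles trigger_dict → Spec_score_vector_py articles trigger_dict (score_vector_py articles trigger_dict)
def Claim_changed_score_vector_py : Prop := Dom_score_vector_py (pvDiffWitness_score_vector_py.1) (pvDiffWitness_score_vector_py.2) ∧ D_score_vector_py (pvDiffWitness_score_vector_py.1) (pvDiffWitness_score_vector_py.2) ∧ score_vector_py (pvDiffWitness_score_vector_py.1) (pvDiffWitness_score_vector_py.2) = pvDiffWitnessOut_score_vector_py.1 ∧ score_vector_py_alt (pvDiffWitness_score_vector_py.1) (pvDiffWitness_score_vector_py.2) = pvDiffWitnessOut_score_vector_py.2 ∧ pvDiffWitnessOut_score_vector_py.1 ≠ pvDiffWitnessOut_score_vector_py.2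
def Claim_exact_score_vector_py : Prop := ∀ (articles : List (List (String × String))) (trigger_dict : List (Int × List String)), Dom_score_vector_py articles trigger_dict → D_score_vector_py articles trigger_dict → score_vector_py articles trigger_dict ≠ score_vector_py_alt articles trigger_dict

-- ===== LEMMAS AND PROOFS =====

-- A's per-article, per-level accumulator update, abstracted
def pvUpd (st : Int × Option String) (o : Option (Int × String)) : Int × Option String :=
  match o with
  | none => st
  | some (L, p) => if L > st.1 then (L, some p) else st

-- first (level, phrase) hit of a text in a list of levels
def pvFindL (phr : Int → List String) (levels : List Int) (t : List Char) : Option (Int × String) :=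
  match levels with
  | [] => none
  | L :: ls =>
    match pvB_firstPhrase (phr L) t with
    | some p => some (L, p)
    | none => pvFindL phr ls t

-- proof-side reference loop: B's level loop with an additional break at the first non-positive
-- level (A is proved equal to this unconditionally; it equals pvB_levels outside D_)
def pvBr_levels (d : PySem.Dict Int (List String)) (texts : List (List Char)) :
    List Int → Int × Option String
  | [] => (0, none)
  | L :: ls =>
    if L ≤ 0 then (0, none)
    else
      match pvB_scan texts (d.getD L []) with
      | some p => (L, some p)
      | none => pvBr_levels d texts ls

theorem pvA_phrases_eq (text : List Char) (level : Int) (phrases : List String)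
    (st : Int × Option String) :
    pvA_phrases text level phrases st
      = pvUpd st ((pvB_firstPhrase phrases text).map (fun p => (level, p))) := by
  induction phrases with
  | nil => rfl
  | cons p ps ih =>
    simp only [pvA_phrases, pvB_firstPhrase]
    split
    · rfl
    · exact ih

theorem pvFindL_mem {phr : Int → List String} {levels : List Int} {t : List Char}
    {L : Int} {p : String} (h : pvFindL phr levels t = some (L, p)) : L ∈ levels := by
  induction levels with
  | nil => simp [pvFindL] at h
  | cons L' ls ih =>
    simp only [pvFindL] at h
    cases hf : pvB_firstPhrase (phr L') t with
    | some q => rw [hf] at h; simp_all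
    | none => rw [hf] at h; exact List.mem_cons_of_mem _ (ih h)

-- A's level loop is a no-op when every remaining level is ≤ the running max
theorem pvNopL (phr : Int → List String) (t : List Char) (levels : List Int)
    (st : Int × Option String) (h : ∀ L ∈ levels, L ≤ st.1) :
    levels.foldl (fun st level => pvA_phrases t level (phr level) st) st = st := by
  induction levels generalizing st with
  | nil => rfl
  | cons L ls ih =>
    have hstep : pvA_phrases t L (phr L) st = st := by
      rw [pvA_phrases_eq]
      cases pvB_firstPhrase (phr L) t with
      | none => rfl
      | some p =>
        have : ¬ L > st.1 := not_lt.mpr (h L (List.mem_cons_self))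
        simp [pvUpd, this]
    simpa [List.foldl_cons, hstep] using ih st (fun L' hL' => h L' (List.mem_cons_of_mem _ hL'))

-- A's level loop over strictly descending levels returns the first hit, max-merged
theorem pvLVL (phr : Int → List String) (t : List Char) (levels : List Int)
    (st : Int × Option String) (h : levels.Pairwise (· > ·)) :
    levels.foldl (fun st level => pvA_phrases t level (phr level) st) st
      = pvUpd st (pvFindL phr levels t) := by
  induction levels generalizing st with
  | nil => rfl
  | cons L ls ih =>
    have hd : ∀ L' ∈ ls, L' < L := fun L' hL' => (List.pairwise_cons.mp h).1 L' hL'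
    have hp : ls.Pairwise (· > ·) := (List.pairwise_cons.mp h).2
    rw [List.foldl_cons, pvA_phrases_eq]
    cases hf : pvB_firstPhrase (phr L) t with
    | none =>
      have h1 : pvUpd st (Option.map (fun p => (L, p)) none) = st := rfl
      rw [h1, ih st hp]
      simp [pvFindL, hf]
    | some p =>
      by_cases hgt : L > st.1
      · have h1 : pvUpd st (Option.map (fun p => (L, p)) (some p)) = (L, some p) := by
          simp [pvUpd, hgt]
        rw [h1, pvNopL phr t ls (L, some p) (fun L' hL' => le_of_lt (hd L' hL'))]
        simp [pvFindL, hf, pvUpd, hgt]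
      · have hle : ∀ L' ∈ ls, L' ≤ st.1 :=
          fun L' hL' => le_of_lt (lt_of_lt_of_le (hd L' hL') (not_lt.mp hgt))
        have h1 : pvUpd st (Option.map (fun p => (L, p)) (some p)) = st := by
          simp [pvUpd, hgt]
        rw [h1, pvNopL phr t ls st hle]
        simp [pvFindL, hf, pvUpd, hgt]

-- A's article fold is a no-op when every hit is at a level ≤ the running max
theorem pvNopF (phr : Int → List String) (levels : List Int) (texts : List (List Char))
    (st : Int × Option String)
    (h : ∀ t ∈ texts, ∀ L p, pvFindL phr levels t = some (L, p) → L ≤ st.1) :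
    texts.foldl (fun st t => pvUpd st (pvFindL phr levels t)) st = st := by
  induction texts generalizing st with
  | nil => rfl
  | cons t ts ih =>
    have hstep : pvUpd st (pvFindL phr levels t) = st := by
      cases hf : pvFindL phr levels t with
      | none => rfl
      | some o =>
        obtain ⟨L, p⟩ := o
        have : ¬ L > st.1 := not_lt.mpr (h t List.mem_cons_self L p hf)
        simp [pvUpd, this]
    simpa [List.foldl_cons, hstep] using
      ih st (fun t' ht' => h t' (List.mem_cons_of_mem _ ht'))

-- peel the head level off A's article fold: first scan for level L, then the rest
theorem pvFOLD (phr : Int → List String) (L : Int) (ls : List Int)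
    (texts : List (List Char)) (st : Int × Option String)
    (hst : st.1 < L) (hlow : ∀ L' ∈ ls, L' < L) :
    texts.foldl (fun st t => pvUpd st (pvFindL phr (L :: ls) t)) st
      = match pvB_scan texts (phr L) with
        | some p => (L, some p)
        | none => texts.foldl (fun st t => pvUpd st (pvFindL phr ls t)) st := by
  induction texts generalizing st with
  | nil => rfl
  | cons t ts ih =>
    cases hf : pvB_firstPhrase (phr L) t with
    | some p =>
      have hhead : pvFindL phr (L :: ls) t = some (L, p) := by simp [pvFindL, hf]
      have hupd : pvUpd st (pvFindL phr (L :: ls) t) = (L, some p) := by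
        simp [hhead, pvUpd, hst]
      have hstay : ts.foldl (fun st t => pvUpd st (pvFindL phr (L :: ls) t)) (L, some p)
          = (L, some p) := by
        refine pvNopF phr (L :: ls) ts (L, some p) ?_
        intro t' _ L' p' hf'
        rcases List.mem_cons.mp (pvFindL_mem hf') with h | h
        · exact le_of_eq h
        · exact le_of_lt (hlow L' h)
      simp [List.foldl_cons, hupd, hstay, pvB_scan, hf]
    | none =>
      have hhead : pvFindL phr (L :: ls) t = pvFindL phr ls t := by simp [pvFindL, hf]
      have hst' : (pvUpd st (pvFindL phr ls t)).1 < L := by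
        cases hg : pvFindL phr ls t with
        | none => simpa [pvUpd] using hst
        | some o =>
          obtain ⟨L', p'⟩ := o
          have hL' : L' < L := hlow L' (pvFindL_mem hg)
          by_cases hgt : L' > st.1 <;> simp [pvUpd, hgt, hL', hst]
      simpa [List.foldl_cons, hhead, pvB_scan, hf] using ih (pvUpd st (pvFindL phr ls t)) hst'

-- the main bridge: A's article fold equals the break-at-nonpositive descending-level search
theorem pvMAIN (d : PySem.Dict Int (List String)) (levels : List Int)
    (texts : List (List Char)) (h : levels.Pairwise (· > ·)) :
    texts.foldl (fun st t => pvUpd st (pvFindL (fun L => d.getD L []) levels t)) (0, none)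
      = pvBr_levels d texts levels := by
  induction levels with
  | nil =>
    rw [pvBr_levels, pvNopF]
    intro t _ L p hf
    simp [pvFindL] at hf
  | cons L ls ih =>
    have hd : ∀ L' ∈ ls, L' < L := fun L' hL' => (List.pairwise_cons.mp h).1 L' hL'
    have hp : ls.Pairwise (· > ·) := (List.pairwise_cons.mp h).2
    by_cases hL : L ≤ 0
    · rw [pvBr_levels, if_pos hL, pvNopF]
      intro t _ L' p hf
      rcases List.mem_cons.mp (pvFindL_mem hf) with heq | hm
      · simpa [heq] using hL
      · exact le_of_lt (lt_of_lt_of_le (hd L' hm) hL)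
    · have h0 : ((0 : Int), (none : Option String)).1 < L := by
        simpa using lt_of_not_ge hL
      rw [pvFOLD (fun L => d.getD L []) L ls texts (0, none) h0 hd]
      rw [pvBr_levels, if_neg hL]
      cases hs : pvB_scan texts (d.getD L []) with
      | some p => simp
      | none => simpa using ih hp

-- A as a function of the sorted levels: packaged form of the calc in the old proof
theorem pvA_eq_pvBr (articles : List (List (String × String))) (trigger_dict : List (Int × List String)) :
    score_vector_py articles trigger_dict
      = pvBr_levels (PySem.Dict.ofList trigger_dict) (articles.map pvText)
          (PySem.List.sorted (PySem.Dict.ofList trigger_dict).keys (fun x => x) true) := by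
  unfold score_vector_py
  set d := PySem.Dict.ofList trigger_dict with hd
  set levels := PySem.List.sorted d.keys (fun x => x) true with hlv
  have hnd : levels.Nodup := by
    have := PySem.List.sorted_perm (xs := d.keys) (key := fun x => x) (rev := true)
    exact this.nodup_iff.mpr (PySem.Dict.nodup_keys_ofList trigger_dict)
  have hge : levels.Pairwise (fun a b => b ≤ a) := by
    simpa using PySem.List.sorted_pairwise_rev (xs := d.keys) (key := fun x => x)
  have hpw : levels.Pairwise (· > ·) := by
    have := List.Pairwise.and hge hnd
    exact this.imp (fun ⟨hle, hne⟩ => lt_of_le_of_ne hle (Ne.symm hne))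
  calc articles.foldl
        (fun st art => levels.foldl (fun st level => pvA_phrases (pvText art) level (d.getD level []) st) st)
        (0, none)
      = articles.foldl (fun st art => pvUpd st (pvFindL (fun L => d.getD L []) levels (pvText art))) (0, none) := by
        apply PySem.List.foldl_congr_mem
        intro st art _
        exact pvLVL (fun L => d.getD L []) (pvText art) levels st hpw
    _ = (articles.map pvText).foldl (fun st t => pvUpd st (pvFindL (fun L => d.getD L []) levels t)) (0, none) := by
        rw [List.foldl_map]
    _ = pvBr_levels d (articles.map pvText) levels := pvMAIN d levels (articles.map pvText) hpw

-- hit booleans vs B's scan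
theorem pvFirst_none_iff (phrases : List String) (t : List Char) :
    pvB_firstPhrase phrases t = none
      ↔ ∀ p ∈ phrases, PySem.Chars.isIn (PySem.Chars.lower p.toList) t = false := by
  induction phrases with
  | nil => simp [pvB_firstPhrase]
  | cons p ps ih =>
    simp only [pvB_firstPhrase]
    split
    · simp_all
    · simp_all

theorem pvScan_none_iff (texts : List (List Char)) (phrases : List String) :
    pvB_scan texts phrases = none ↔ ∀ t ∈ texts, pvB_firstPhrase phrases t = none := by
  induction texts with
  | nil => simp [pvB_scan]
  | cons t ts ih =>
    simp only [pvB_scan]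
    cases hf : pvB_firstPhrase phrases t with
    | some p => simp_all
    | none => simp_all

theorem pvHitB_false_iff (articles : List (List (String × String))) (phrases : List String) :
    pvHitB articles phrases = false ↔ pvB_scan (articles.map pvText) phrases = none := by
  rw [pvScan_none_iff]
  unfold pvHitB
  constructor
  · intro h t ht
    obtain ⟨art, hart, rfl⟩ := List.mem_map.mp ht
    rw [pvFirst_none_iff]
    intro p hp
    have h1 := List.any_eq_false.mp h art hart
    have h2 := List.any_eq_false.mp (by simpa using h1) p hp
    simpa using h2
  · intro h
    apply List.any_eq_false.mpr
    intro art hart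
    have := (pvFirst_none_iff phrases (pvText art)).mp (h _ (List.mem_map.mpr ⟨art, hart, rfl⟩))
    simpa [List.any_eq_false] using this

-- if no level in the list has a hit, B's level loop returns (0, none)
theorem pvB_levels_nohit (d : PySem.Dict Int (List String)) (texts : List (List Char))
    (levels : List Int) (h : ∀ L ∈ levels, pvB_scan texts (d.getD L []) = none) :
    pvB_levels d texts levels = (0, none) := by
  induction levels with
  | nil => rfl
  | cons L ls ih =>
    rw [pvB_levels, h L List.mem_cons_self]
    exact ih (fun L' hL' => h L' (List.mem_cons_of_mem _ hL'))

-- same for the break variant, under "no positive level has a hit"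
theorem pvBr_levels_nohit (d : PySem.Dict Int (List String)) (texts : List (List Char))
    (levels : List Int) (h : ∀ L ∈ levels, 0 < L → pvB_scan texts (d.getD L []) = none) :
    pvBr_levels d texts levels = (0, none) := by
  induction levels with
  | nil => rfl
  | cons L ls ih =>
    rw [pvBr_levels]
    by_cases hL : L ≤ 0
    · rw [if_pos hL]
    · rw [if_neg hL, h L List.mem_cons_self (lt_of_not_ge hL)]
      exact ih (fun L' hL' => h L' (List.mem_cons_of_mem _ hL'))

-- if some level in the list has a hit, B's result carries a phrase
theorem pvB_levels_isSome (d : PySem.Dict Int (List String)) (texts : List (List Char))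
    (levels : List Int) (h : ∃ L ∈ levels, pvB_scan texts (d.getD L []) ≠ none) :
    (pvB_levels d texts levels).2.isSome := by
  induction levels with
  | nil => simp at h
  | cons L ls ih =>
    rw [pvB_levels]
    cases hs : pvB_scan texts (d.getD L []) with
    | some p => simp
    | none =>
      apply ih
      obtain ⟨L', hL', hne⟩ := h
      rcases List.mem_cons.mp hL' with rfl | hm
      · exact absurd hs hne
      · exact ⟨L', hm, hne⟩

-- outside D_, the break variant equals B's loop: case "no non-positive level has a hit"
theorem pvBr_eq_pvB_nononpos (d : PySem.Dict Int (List String)) (texts : List (List Char))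
    (levels : List Int) (hpw : levels.Pairwise (· > ·))
    (h : ∀ L ∈ levels, L ≤ 0 → pvB_scan texts (d.getD L []) = none) :
    pvBr_levels d texts levels = pvB_levels d texts levels := by
  induction levels with
  | nil => rfl
  | cons L ls ih =>
    have hd : ∀ L' ∈ ls, L' < L := fun L' hL' => (List.pairwise_cons.mp hpw).1 L' hL'
    have hp : ls.Pairwise (· > ·) := (List.pairwise_cons.mp hpw).2
    rw [pvBr_levels, pvB_levels]
    by_cases hL : L ≤ 0
    · rw [if_pos hL, h L List.mem_cons_self hL]
      refine (pvB_levels_nohit d texts ls ?_).symm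
      intro L' hL'
      exact h L' (List.mem_cons_of_mem _ hL') (le_of_lt (lt_of_lt_of_le (hd L' hL') hL))
    · rw [if_neg hL]
      cases pvB_scan texts (d.getD L []) with
      | some p => rfl
      | none => exact ih hp (fun L' hL' => h L' (List.mem_cons_of_mem _ hL'))

-- … and case "some positive level has a hit"
theorem pvBr_eq_pvB_poshit (d : PySem.Dict Int (List String)) (texts : List (List Char))
    (levels : List Int) (hpw : levels.Pairwise (· > ·))
    (h : ∃ L ∈ levels, 0 < L ∧ pvB_scan texts (d.getD L []) ≠ none) :
    pvBr_levels d texts levels = pvB_levels d texts levels := by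
  induction levels with
  | nil => rfl
  | cons L ls ih =>
    have hd : ∀ L' ∈ ls, L' < L := fun L' hL' => (List.pairwise_cons.mp hpw).1 L' hL'
    have hp : ls.Pairwise (· > ·) := (List.pairwise_cons.mp hpw).2
    obtain ⟨L0, hL0, hpos, hne⟩ := h
    have hLpos : 0 < L := by
      rcases List.mem_cons.mp hL0 with rfl | hm
      · exact hpos
      · exact lt_trans hpos (hd L0 hm)
    rw [pvBr_levels, pvB_levels, if_neg (not_le.mpr hLpos)]
    cases hs : pvB_scan texts (d.getD L []) with
    | some p => rfl
    | none =>
      apply ih hp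
      rcases List.mem_cons.mp hL0 with rfl | hm
      · exact absurd hs hne
      · exact ⟨L0, hm, hpos, hne⟩

-- membership transfer: sorted levels are a permutation of the dict's keys
theorem pvLevels_mem (trigger_dict : List (Int × List String)) (L : Int) :
    L ∈ PySem.List.sorted (PySem.Dict.ofList trigger_dict).keys (fun x => x) true
      ↔ L ∈ (PySem.Dict.ofList trigger_dict).keys :=
  (PySem.List.sorted_perm (xs := (PySem.Dict.ofList trigger_dict).keys)
    (key := fun x => x) (rev := true)).mem_iff

theorem pvLevels_pairwise (trigger_dict : List (Int × List String)) :
    (PySem.List.sorted (PySem.Dict.ofList trigger_dict).keys (fun x => x) true).Pairwise (· > ·) := by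
  have hnd : (PySem.List.sorted (PySem.Dict.ofList trigger_dict).keys (fun x => x) true).Nodup :=
    (PySem.List.sorted_perm (xs := (PySem.Dict.ofList trigger_dict).keys) (key := fun x => x)
      (rev := true)).nodup_iff.mpr (PySem.Dict.nodup_keys_ofList trigger_dict)
  have hge : (PySem.List.sorted (PySem.Dict.ofList trigger_dict).keys (fun x => x) true).Pairwise
      (fun a b => b ≤ a) := by
    simpa using PySem.List.sorted_pairwise_rev
      (xs := (PySem.Dict.ofList trigger_dict).keys) (key := fun x => x)
  exact (List.Pairwise.and hge hnd).imp (fun ⟨hle, hne⟩ => lt_of_le_of_ne hle (Ne.symm hne))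

-- ===== VERDICT (by name: the statements are the Claim_ definitions above) =====
theorem score_vector_py_spec : Claim_unchanged_score_vector_py := by
  intro articles trigger_dict _ hnD
  rw [pvA_eq_pvBr]
  unfold score_vector_py_alt
  set d := PySem.Dict.ofList trigger_dict with hd
  set levels := PySem.List.sorted d.keys (fun x => x) true with hlv
  have hpw : levels.Pairwise (· > ·) := pvLevels_pairwise trigger_dict
  unfold D_score_vector_py at hnD
  rcases Decidable.not_and_iff_not_or_not.mp hnD with hX | hY
  · -- the hit list is empty: no level at all has a hit
    have hX' : d.keys.filter (fun L => pvHitB articles (d.getD L [])) = [] := by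
      simpa using not_not.mp hX
    refine pvBr_eq_pvB_nononpos d (articles.map pvText) levels hpw ?_
    intro L hL _
    have hk : L ∈ d.keys := (pvLevels_mem trigger_dict L).mp hL
    by_contra hne
    have hhit : pvHitB articles (d.getD L []) = true := by
      cases hb : pvHitB articles (d.getD L []) with
      | true => rfl
      | false => exact absurd ((pvHitB_false_iff _ _).mp hb) hne
    have : L ∈ d.keys.filter (fun L => pvHitB articles (d.getD L [])) :=
      List.mem_filter.mpr ⟨hk, hhit⟩
    simp [hX'] at this
  · -- some level in the hit list is positive
    have hY' : ¬ ∀ L ∈ d.keys.filter (fun L => pvHitB articles (d.getD L [])), L ≤ 0 := by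
      intro hall
      exact hY (List.all_eq_true.mpr (fun L hL => decide_eq_true (hall L hL)))
    push Not at hY'
    obtain ⟨L, hLf, hpos⟩ := hY'
    obtain ⟨hk, hhit⟩ := List.mem_filter.mp hLf
    refine pvBr_eq_pvB_poshit d (articles.map pvText) levels hpw
      ⟨L, (pvLevels_mem trigger_dict L).mpr hk, lt_of_not_ge (by simpa using hpos), ?_⟩
    intro hnone
    have : pvHitB articles (d.getD L []) = false := (pvHitB_false_iff _ _).mpr hnone
    simp [this] at hhit

theorem score_vector_py_tight : Claim_exact_score_vector_py := by
  intro articles trigger_dict _ hD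
  obtain ⟨hne, hall⟩ := hD
  set d := PySem.Dict.ofList trigger_dict with hd
  set levels := PySem.List.sorted d.keys (fun x => x) true with hlv
  have hA : score_vector_py articles trigger_dict = (0, none) := by
    rw [pvA_eq_pvBr]
    refine pvBr_levels_nohit d (articles.map pvText) levels ?_
    intro L hL hpos
    have hk : L ∈ d.keys := (pvLevels_mem trigger_dict L).mp hL
    cases hb : pvHitB articles (d.getD L []) with
    | false => exact (pvHitB_false_iff _ _).mp hb
    | true =>
      have hmem : L ∈ d.keys.filter (fun L => pvHitB articles (d.getD L [])) :=
        List.mem_filter.mpr ⟨hk, hb⟩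
      have := of_decide_eq_true (List.all_eq_true.mp hall L hmem)
      omega
  have hB : (score_vector_py_alt articles trigger_dict).2.isSome := by
    unfold score_vector_py_alt
    obtain ⟨L, hLf⟩ := List.exists_mem_of_ne_nil _ hne
    obtain ⟨hk, hhit⟩ := List.mem_filter.mp hLf
    refine pvB_levels_isSome d (articles.map pvText) levels ⟨L, (pvLevels_mem trigger_dict L).mpr hk, ?_⟩
    intro hnone
    have : pvHitB articles (d.getD L []) = false := (pvHitB_false_iff _ _).mpr hnone
    simp [this] at hhit
  intro heq
  rw [hA] at heq
  rw [← heq] at hB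
  simp at hB

theorem score_vector_py_changed : Claim_changed_score_vector_py := by
  unfold Claim_changed_score_vector_py; decide
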